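-- pv_equiv track=rewrite | github.com/AlanDorantesVerdin/IA_P3_MetodosOrdenamiento | 11_Metodo_PolyphaseSort.py | split_into_polyphase_runs
-- ===== SOURCE A (Python) =====
-- def split_into_polyphase_runs(arr):
--     runs = []
--     temp = [arr[0]]
--
--     for i in range(1, len(arr)):
--         if arr[i] >= arr[i - 1]:
--             temp.append(arr[i])
--         else:
--             runs.append(temp)
--             temp = [arr[i]]
--     runs.append(temp)
--
--     runs.sort(key=len)  # Polyphase requiere runs desbalanceados
--     return runs
-- ===== SOURCE B (Python) =====
-- def split_into_polyphase_runs(arr):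
--     n = len(arr)
--     starts = [0] + [i for i in range(1, n) if arr[i] < arr[i - 1]] + [n]
--     runs = [arr[a:b] for a, b in zip(starts, starts[1:])]
--     runs.sort(key=len)
--     return runs
-- ===== Notes on version B (the rewrite author's own statement) =====
-- stated objective: alternative
-- what changed: Instead of A's stateful scan that grows a temp run and appends it at each descent, B first collects all descent indices in one comprehension, builds the runs by slicing the array between consecutive cut points, then applies the same stable length-sort; Pre_ excludes the empty list, on which A raises IndexError.
import Mathlib
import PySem

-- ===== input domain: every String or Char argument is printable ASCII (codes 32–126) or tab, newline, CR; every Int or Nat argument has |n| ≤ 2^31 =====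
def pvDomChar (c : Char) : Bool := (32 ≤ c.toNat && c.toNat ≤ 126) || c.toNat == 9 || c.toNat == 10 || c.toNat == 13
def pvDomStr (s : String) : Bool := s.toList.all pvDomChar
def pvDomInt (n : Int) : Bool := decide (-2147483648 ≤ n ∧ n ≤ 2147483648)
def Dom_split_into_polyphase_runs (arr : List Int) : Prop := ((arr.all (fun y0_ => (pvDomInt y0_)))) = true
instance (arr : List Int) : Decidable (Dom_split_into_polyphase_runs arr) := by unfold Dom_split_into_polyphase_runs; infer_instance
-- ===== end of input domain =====

-- B builds the runs by slicing between precomputed descent indices instead of A's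
-- stateful scan with incremental appends; same stable length-sort at the end.
-- Pre_ excludes the empty list, on which A raises IndexError.

-- ===== PORT A =====
-- loop body of A's for-loop: state = (runs, temp)
def pvStepA (arr : List Int) (st : List (List Int) × List Int) (i : Int) :
    List (List Int) × List Int :=
  if PySem.List.pyGetD arr i 0 ≥ PySem.List.pyGetD arr (i - 1) 0 then
    (st.1, st.2 ++ [PySem.List.pyGetD arr i 0])
  else
    (st.1 ++ [st.2], [PySem.List.pyGetD arr i 0])

def split_into_polyphase_runs (arr : List Int) : List (List Int) :=
  let st := (PySem.List.pyRange 1 (arr.length : Int) 1).foldl (pvStepA arr)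
    ([], [PySem.List.pyGetD arr 0 0])
  PySem.List.sorted (st.1 ++ [st.2]) (fun r => r.length) false

-- ===== PORT B =====
-- descent test arr[i] < arr[i-1]
def pvCutB (arr : List Int) (i : Int) : Bool :=
  decide (PySem.List.pyGetD arr i 0 < PySem.List.pyGetD arr (i - 1) 0)

def split_into_polyphase_runs_alt (arr : List Int) : List (List Int) :=
  let n : Int := arr.length
  let starts : List Int := 0 :: ((PySem.List.pyRange 1 n 1).filter (pvCutB arr) ++ [n])
  let runs := (starts.zip starts.tail).map
    (fun p => PySem.List.slice arr (some p.1) (some p.2))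
  PySem.List.sorted runs (fun r => r.length) false

-- ===== PRECONDITION & SPEC =====
-- A evaluates arr[0] before the loop, so it raises IndexError exactly on the empty list.
def Pre_split_into_polyphase_runs (arr : List Int) : Prop := arr ≠ []
instance (arr : List Int) : Decidable (Pre_split_into_polyphase_runs arr) := by
  unfold Pre_split_into_polyphase_runs; infer_instance
def pvWitness_split_into_polyphase_runs : List Int := [3, 1, 2]

def Spec_split_into_polyphase_runs (arr : List Int) (out : List (List Int)) : Prop := out = split_into_polyphase_runs_alt arr
instance (arr : List Int) (out : List (List Int)) : Decidable (Spec_split_into_polyphase_runs arr out) := by unfold Spec_split_into_polyphase_runs; infer_instance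

-- ===== CLAIM (what is proved, stated in full; the proofs are below) =====
def Claim_equal_split_into_polyphase_runs : Prop := ∀ (arr : List Int), Dom_split_into_polyphase_runs arr → Pre_split_into_polyphase_runs arr → Spec_split_into_polyphase_runs arr (split_into_polyphase_runs arr)

-- ===== LEMMAS AND PROOFS =====

-- consecutive pairs of a list appended on the right (head given explicitly)
theorem pv_zip_tail_append_singleton (a : Int) (t : List Int) (x : Int) :
    ((a :: t) ++ [x]).zip ((a :: t) ++ [x]).tail =
      (a :: t).zip (a :: t).tail ++ [(t.getLastD a, x)] := by
  induction t generalizing a with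
  | nil => simp
  | cons b u ih =>
    have := ih b
    simp only [List.cons_append, List.zip_cons_cons, List.tail_cons] at this ⊢
    rw [this]
    simp only [List.getLastD_cons]

-- appending the next element to a slice
theorem pv_slice_snoc (arr : List Int) (s m : Int) (hs0 : 0 ≤ s) (hsm : s ≤ m)
    (hm : m.toNat < arr.length) :
    PySem.List.slice arr (some s) (some m) ++ [arr[m.toNat]] =
      PySem.List.slice arr (some s) (some (m + 1)) := by
  rw [PySem.List.slice_toNat arr hs0 (by omega), PySem.List.slice_toNat arr hs0 (by omega)]
  have h1 : (m + 1).toNat - s.toNat = (m.toNat - s.toNat) + 1 := by omega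
  rw [h1, List.take_add_one]
  have h2 : (arr.drop s.toNat)[m.toNat - s.toNat]? = some arr[m.toNat] := by
    rw [List.getElem?_drop]
    rw [List.getElem?_eq_getElem (by omega)]
    congr 1
    congr 1
    omega
  rw [h2]
  simp

-- main loop invariant: after processing range(1, m), the accumulated runs are the
-- slices between consecutive elements of 0 :: cuts, and temp is the slice from the
-- last cut to m.
theorem pv_inv (arr : List Int) (k : Nat) (hk : 1 + (k : Int) ≤ (arr.length : Int)) :
    ∀ (m : Int), m = 1 + (k : Int) →
    (PySem.List.pyRange 1 m 1).foldl (pvStepA arr) ([], [PySem.List.pyGetD arr 0 0]) =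
      (((0 :: (PySem.List.pyRange 1 m 1).filter (pvCutB arr)).zip
          ((0 :: (PySem.List.pyRange 1 m 1).filter (pvCutB arr)).tail)).map
        (fun p => PySem.List.slice arr (some p.1) (some p.2)),
       PySem.List.slice arr
         (some (((PySem.List.pyRange 1 m 1).filter (pvCutB arr)).getLastD 0))
         (some m))
    ∧ 0 ≤ ((PySem.List.pyRange 1 m 1).filter (pvCutB arr)).getLastD 0
    ∧ ((PySem.List.pyRange 1 m 1).filter (pvCutB arr)).getLastD 0 ≤ m := by
  induction k with
  | zero =>
    intro m hm
    subst hm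
    have hr : PySem.List.pyRange 1 (1 + ((0 : Nat) : Int)) 1 = [] :=
      PySem.List.pyRange_one_eq_nil (by omega)
    have ha : arr ≠ [] := by
      intro h; subst h; simp at hk
    rw [hr]
    refine ⟨?_, by simp, by simp⟩
    simp only [List.foldl_nil, List.filter_nil, List.zip, List.tail_cons, List.getLastD_nil]
    rw [PySem.List.slice_toNat arr (by omega) (by omega)]
    cases arr with
    | nil => exact absurd rfl ha
    | cons a t =>
      simp [PySem.List.pyGetD_zero_cons]
  | succ j ih =>
    intro m hm
    have hm' : m = (1 + (j : Int)) + 1 := by rw [hm]; push_cast; ring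
    have hprev := ih (by omega) (1 + (j : Int)) rfl
    have hrange : PySem.List.pyRange 1 m 1 =
        PySem.List.pyRange 1 (1 + (j : Int)) 1 ++ [1 + (j : Int)] := by
      rw [hm']
      exact PySem.List.pyRange_one_succ_right (by omega)
    set m' : Int := 1 + (j : Int) with hm'def
    have hm'lt : m'.toNat < arr.length := by omega
    have hget : PySem.List.pyGetD arr m' 0 = arr[m'.toNat] :=
      PySem.List.pyGetD_eq_getElem arr 0 (by omega) (by omega)
    obtain ⟨hfold, hs0, hsm⟩ := hprev
    rw [hrange, List.foldl_append, List.filter_append, hfold]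
    simp only [List.foldl_cons, List.foldl_nil, List.filter_cons, List.filter_nil]
    set cuts := (PySem.List.pyRange 1 m' 1).filter (pvCutB arr) with hcuts
    by_cases hc : pvCutB arr m' = true
    · -- descent: close the current run, start a new one at m'
      rw [if_pos hc]
      have hstep : pvStepA arr
          (((0 :: cuts).zip (0 :: cuts).tail).map
            (fun p => PySem.List.slice arr (some p.1) (some p.2)),
           PySem.List.slice arr (some (cuts.getLastD 0)) (some m')) m' =
          (((0 :: cuts).zip (0 :: cuts).tail).map
            (fun p => PySem.List.slice arr (some p.1) (some p.2)) ++
            [PySem.List.slice arr (some (cuts.getLastD 0)) (some m')],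
           [arr[m'.toNat]]) := by
        unfold pvStepA
        unfold pvCutB at hc
        rw [if_neg (by simpa using hc), hget]
      rw [hstep]
      refine ⟨?_, ?_, ?_⟩
      · have heq : ((0 : Int) :: (cuts ++ [m'])) = (0 :: cuts) ++ [m'] := by simp
        rw [heq, pv_zip_tail_append_singleton 0 cuts m', List.map_append]
        simp only [Prod.mk.injEq]
        constructor
        · simp
        · have hlast : (cuts ++ [m']).getLastD 0 = m' := by simp
          rw [hlast]
          rw [PySem.List.slice_toNat arr (by omega) (by omega)]
          have h1 : m.toNat - m'.toNat = 1 := by omega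
          rw [h1]
          have h2 : arr.drop m'.toNat = arr[m'.toNat] :: arr.drop (m'.toNat + 1) :=
            List.drop_eq_getElem_cons hm'lt
          rw [h2]
          simp only [List.take_succ_cons, List.take_zero]
      · simp; omega
      · simp; omega
    · -- ascent: extend the current run
      rw [if_neg hc]
      simp only [List.append_nil]
      have hstep : pvStepA arr
          (((0 :: cuts).zip (0 :: cuts).tail).map
            (fun p => PySem.List.slice arr (some p.1) (some p.2)),
           PySem.List.slice arr (some (cuts.getLastD 0)) (some m')) m' =
          (((0 :: cuts).zip (0 :: cuts).tail).map
            (fun p => PySem.List.slice arr (some p.1) (some p.2)),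
           PySem.List.slice arr (some (cuts.getLastD 0)) (some m') ++ [arr[m'.toNat]]) := by
        unfold pvStepA
        unfold pvCutB at hc
        rw [if_pos (by simpa using hc), hget]
      rw [hstep]
      refine ⟨?_, hs0, by omega⟩
      simp only [Prod.mk.injEq]
      constructor
      · trivial
      · rw [pv_slice_snoc arr _ m' hs0 hsm hm'lt, hm']

-- the two unsorted run lists coincide
theorem pv_runs_eq (arr : List Int) (ha : arr ≠ []) :
    (let st := (PySem.List.pyRange 1 (arr.length : Int) 1).foldl (pvStepA arr)
        ([], [PySem.List.pyGetD arr 0 0]);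
     st.1 ++ [st.2]) =
    (let n : Int := arr.length
     let starts : List Int := 0 :: ((PySem.List.pyRange 1 n 1).filter (pvCutB arr) ++ [n])
     (starts.zip starts.tail).map (fun p => PySem.List.slice arr (some p.1) (some p.2))) := by
  have hlen : 1 ≤ arr.length := by
    cases arr with
    | nil => exact absurd rfl ha
    | cons a t => simp
  obtain ⟨hfold, hs0, hsm⟩ :=
    pv_inv arr (arr.length - 1) (by omega) (arr.length : Int) (by omega)
  simp only []
  rw [hfold]
  set cuts := (PySem.List.pyRange 1 (arr.length : Int) 1).filter (pvCutB arr) with hcuts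
  have heq : ((0 : Int) :: (cuts ++ [(arr.length : Int)])) = (0 :: cuts) ++ [(arr.length : Int)] := by
    simp
  rw [heq, pv_zip_tail_append_singleton 0 cuts (arr.length : Int), List.map_append]
  simp

-- ===== VERDICT (by name: the statement is the Claim_ definition above) =====
theorem split_into_polyphase_runs_spec : Claim_equal_split_into_polyphase_runs := by
  intro arr _hdom hpre
  unfold Spec_split_into_polyphase_runs
  unfold split_into_polyphase_runs split_into_polyphase_runs_alt
  have := pv_runs_eq arr hpre
  simp only [] at this ⊢
  rw [this]
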